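-- pv_equiv track=rewrite | github.com/inon-peled/advent_of_code | y2016/d09/part1.py | _one_swipe
-- ===== SOURCE A (Python) =====
-- def _one_swipe(s):
--     chars = [c for c in s if c not in [' ', '\t', '\r', '\n']]
--     i = 0
--     result = []
--
--     while i < len(chars):
--         if chars[i] != '(':
--             result.append(chars[i])
--             i += 1
--         else:
--             j = i + 1
--             while chars[j] != ')':
--                 j += 1
--             instruction = ''.join(chars[i + 1:j])
--             offset, repetition = [int(e) for e in instruction.split('x')]
--             chunk = chars[j + 1:j + 1 + offset]
--             result.extend(chunk * repetition)
--             i += 2 + len(instruction) + offset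
--
--     result_joined = ''.join(result)
--     return result_joined
-- ===== SOURCE B (Python) =====
-- def _one_swipe(s):
--     t = ''.join(c for c in s if c not in [' ', '\t', '\r', '\n'])
--     parts = []
--     pos = 0
--     while True:
--         nxt = t.find('(', pos)
--         if nxt == -1:
--             parts.append(t[pos:])
--             break
--         parts.append(t[pos:nxt])
--         end = t.find(')', nxt)
--         if end == -1:
--             raise ValueError('unterminated marker')
--         offset, repetition = [int(e) for e in t[nxt + 1:end].split('x')]
--         parts.append(t[end + 1:end + 1 + offset] * repetition)
--         pos = end + 1 + offset
--     return ''.join(parts)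
-- ===== Notes on version B (the rewrite author's own statement) =====
-- stated objective: faster
-- what changed: A walks the stripped text one character at a time with a hand-written inner while-loop hunting for the closing parenthesis; B jumps between markers with str.find and appends whole slices (literal run, marker expansion) in one step each, so the per-character work happens in C, not in the Python loop.
-- outside the precondition, e.g. on _one_swipe('(-12x0)(9x2)'): A returns '(-12x0)(9(-12x0)(9x2)', B returns ''
import Mathlib
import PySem

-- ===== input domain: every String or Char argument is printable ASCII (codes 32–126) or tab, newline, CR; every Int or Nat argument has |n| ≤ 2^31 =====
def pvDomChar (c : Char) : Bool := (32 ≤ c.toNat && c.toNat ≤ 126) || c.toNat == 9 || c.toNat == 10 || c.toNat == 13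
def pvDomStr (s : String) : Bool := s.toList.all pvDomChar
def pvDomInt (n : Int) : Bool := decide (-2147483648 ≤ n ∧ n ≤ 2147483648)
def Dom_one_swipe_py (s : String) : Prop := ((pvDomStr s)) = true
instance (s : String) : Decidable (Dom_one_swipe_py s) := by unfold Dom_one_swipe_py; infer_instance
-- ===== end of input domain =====

-- B replaces A's per-character scan (with a hand-written inner while-loop hunting for the closing
-- parenthesis) by str.find-based jumps and whole-slice appends (measurably faster, C-level scanning);
-- equivalence is claimed on well-formed inputs (Pre_ below).

-- shared helpers (both Pythons strip the same whitespace, scan for a character, and parse '<int>x<int>')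
def pvStrip (l : List Char) : List Char :=
  l.filter (fun c => !(c == ' ' || c == '\t' || c == '\r' || c == '\n'))

-- first index k' ≥ k with cs[k'] = c (A's inner `while chars[j] != ')': j += 1`; none = ran off the end)
def scanCh (c : Char) (cs : List Char) (k : Nat) : Option Nat :=
  if h : k < cs.length then
    if cs[k] = c then some k else scanCh c cs (k + 1)
  else none
termination_by cs.length - k
decreasing_by omega

-- `offset, repetition = [int(e) for e in instr.split('x')]`; none = ValueError
def parseMarker (instr : List Char) : Option (Int × Int) :=
  match (PySem.Chars.splitOn instr ['x']).map PySem.Int.ofChars? with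
  | [some a, some b] => some (a, b)
  | _ => none

-- ===== PORT A =====
def loopA (cs : List Char) (i : Nat) (acc : List Char) : List Char :=
  if h : i < cs.length then
    if cs[i] ≠ '(' then loopA cs (i + 1) (acc ++ [cs[i]])
    else
      match scanCh ')' cs (i + 1) with
      | none => acc      -- Python: IndexError (outside Pre_)
      | some j =>
        match parseMarker (PySem.List.slice cs (some ((i : Int) + 1)) (some (j : Int))) with
        | none => acc    -- Python: ValueError (outside Pre_)
        | some (off, rep) =>
          -- i += 2 + len(instruction) + offset
          if hlt : (i : Int) <
              (i : Int) + 2 + ((PySem.List.slice cs (some ((i : Int) + 1)) (some (j : Int))).length : Int) + off then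
            loopA cs
              ((i : Int) + 2 + ((PySem.List.slice cs (some ((i : Int) + 1)) (some (j : Int))).length : Int) + off).toNat
              (acc ++ PySem.List.pyRepeat (PySem.List.slice cs (some ((j : Int) + 1)) (some ((j : Int) + 1 + off))) rep)
          else acc       -- totality guard; inside Pre_ the index strictly increases
  else acc
termination_by cs.length - i
decreasing_by · omega
              · omega

def one_swipe_py (s : String) : String := String.ofList (loopA (pvStrip s.toList) 0 [])

-- ===== PORT B =====
def loopB (t : List Char) (pos : Nat) (acc : List Char) : List Char :=
  let nxt := PySem.Chars.findFrom t ['('] (pos : Int) none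
  if nxt = -1 then acc ++ PySem.List.slice t (some (pos : Int)) none   -- t[pos:], break
  else
    let e := PySem.Chars.findFrom t [')'] nxt none
    if e = -1 then acc ++ PySem.List.slice t (some (pos : Int)) (some nxt)   -- Source B: ValueError (outside Pre_)
    else
      match parseMarker (PySem.List.slice t (some (nxt + 1)) (some e)) with
      | none => acc ++ PySem.List.slice t (some (pos : Int)) (some nxt)      -- ValueError (outside Pre_)
      | some (off, rep) =>
        if hlt : pos < (e + 1 + off).toNat ∧ pos < t.length then
          loopB t (e + 1 + off).toNat
            ((acc ++ PySem.List.slice t (some (pos : Int)) (some nxt)) ++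
              PySem.List.pyRepeat (PySem.List.slice t (some (e + 1)) (some (e + 1 + off))) rep)
        else (acc ++ PySem.List.slice t (some (pos : Int)) (some nxt)) ++
              PySem.List.pyRepeat (PySem.List.slice t (some (e + 1)) (some (e + 1 + off))) rep
          -- totality guard; inside Pre_ pos strictly increases
termination_by t.length - pos
decreasing_by show t.length - (e + 1 + off).toNat < t.length - pos; omega

def one_swipe_py_alt (s : String) : String := String.ofList (loopB (pvStrip s.toList) 0 [])

-- ===== PRECONDITION & SPEC =====
-- Pre_ excludes the inputs on which A raises (an opening parenthesis that is never closed, or marker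
-- text that is not exactly two ints) and inputs with a NEGATIVE-offset marker, where A's value is an
-- accident of Python's negative-index wraparound (see claim cites); inside Pre_ every marker is well
-- formed with offset >= 0.
-- wfTail checks this marker grammar on the stripped text; the fuel argument (the text's length bounds the
-- number of grammar steps) only makes the recursion structural.
def wfTail (fuel : Nat) (t : List Char) : Bool :=
  match fuel, t with
  | _, [] => true
  | 0, _ :: _ => false
  | fuel + 1, c :: rest =>
    if c ≠ '(' then wfTail fuel rest
    else
      match rest.findIdx? (fun x => x = ')') with
      | none => false
      | some k =>
        match parseMarker (rest.take k) with
        | none => false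
        | some (off, _) => 0 ≤ off && wfTail fuel ((rest.drop (k + 1)).drop off.toNat)

def Pre_one_swipe_py (s : String) : Prop := wfTail (pvStrip s.toList).length (pvStrip s.toList) = true
instance (s : String) : Decidable (Pre_one_swipe_py s) := by unfold Pre_one_swipe_py; infer_instance

def pvWitness_one_swipe_py : String := "A(2x3)BC"

def Spec_one_swipe_py (s : String) (out : String) : Prop := out = one_swipe_py_alt s
instance (s : String) (out : String) : Decidable (Spec_one_swipe_py s out) := by unfold Spec_one_swipe_py; infer_instance

-- ===== CLAIM (what is proved, stated in full; the proofs are below) =====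
def Claim_equal_one_swipe_py : Prop := ∀ (s : String), Dom_one_swipe_py s → Pre_one_swipe_py s → Spec_one_swipe_py s (one_swipe_py s)

-- ===== LEMMAS AND PROOFS =====

-- index-based form of the precondition, matching the loops' shape (used only by the proofs)
def okFrom (cs : List Char) (i : Nat) : Bool :=
  if h : i < cs.length then
    if cs[i] ≠ '(' then okFrom cs (i + 1)
    else
      match scanCh ')' cs (i + 1) with
      | none => false
      | some j =>
        match parseMarker (PySem.List.slice cs (some ((i : Int) + 1)) (some (j : Int))) with
        | none => false
        | some (off, _) =>
          if hlt : 0 ≤ off ∧ i < j + 1 + off.toNat then okFrom cs (j + 1 + off.toNat) else false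
  else true
termination_by cs.length - i
decreasing_by · omega
              · omega


theorem scanCh_ge_len (c : Char) (cs : List Char) (k : Nat) (h : cs.length ≤ k) :
    scanCh c cs k = none := by
  rw [scanCh]; simp [Nat.not_lt.mpr h]

theorem scanCh_step (c : Char) (cs : List Char) (k : Nat) (hk : k < cs.length)
    (hc : cs[k] ≠ c) : scanCh c cs k = scanCh c cs (k + 1) := by
  rw [scanCh]; simp [hk, hc]

theorem scanCh_none (c : Char) (cs : List Char) (k : Nat) (h : scanCh c cs k = none) :
    ∀ m, k ≤ m → m < cs.length → cs[m]? ≠ some c := by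
  induction hd : cs.length - k generalizing k with
  | zero => intro m h1 h2; omega
  | succ d ihd =>
    intro m h1 h2
    have hk : k < cs.length := by omega
    rw [scanCh] at h
    simp only [hk, dif_pos] at h
    split_ifs at h with hc
    by_cases hm : m = k
    · subst hm
      rw [List.getElem?_eq_getElem h2]
      intro hcon; exact hc (by injection hcon)
    · exact ihd (k + 1) h (by omega) m (by omega) h2

theorem scanCh_some (c : Char) (cs : List Char) (k j : Nat) (h : scanCh c cs k = some j) :
    k ≤ j ∧ j < cs.length ∧ cs[j]? = some c ∧ ∀ m, k ≤ m → m < j → cs[m]? ≠ some c := by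
  induction hd : cs.length - k generalizing k with
  | zero =>
    rw [scanCh_ge_len c cs k (by omega)] at h; simp at h
  | succ d ihd =>
    have hk : k < cs.length := by
      by_contra hcon
      rw [scanCh_ge_len c cs k (by omega)] at h; simp at h
    rw [scanCh] at h
    simp only [hk, dif_pos] at h
    split_ifs at h with hc
    · have hj : j = k := by injection h with h'; omega
      subst hj
      exact ⟨le_rfl, hk, by rw [List.getElem?_eq_getElem hk, hc], fun m hm1 hm2 => by omega⟩
    · obtain ⟨h1, h2, h3, h4⟩ := ihd (k + 1) h (by omega)
      refine ⟨by omega, h2, h3, fun m hm1 hm2 => ?_⟩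
      by_cases hm : m = k
      · subst hm
        rw [List.getElem?_eq_getElem hk]
        intro hcon; exact hc (by injection hcon)
      · exact h4 m (by omega) hm2

theorem prefix_single (c : Char) (l : List Char) : [c] <+: l ↔ l.head? = some c := by
  cases l with
  | nil => simp
  | cons a t => simp [List.cons_prefix_cons, eq_comm]

theorem prefix_single_drop (c : Char) (cs : List Char) (m : Nat) :
    [c] <+: cs.drop m ↔ cs[m]? = some c := by
  rw [prefix_single, List.head?_drop]

theorem infix_single_drop (c : Char) (cs : List Char) (k : Nat) :
    [c] <:+: cs.drop k ↔ ∃ j, cs[k + j]? = some c := by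
  rw [← PySem.Chars.isIn_iff_infix, ← PySem.Chars.exists_prefix_drop_iff_isIn]
  constructor
  · rintro ⟨j, hj⟩
    exact ⟨j, by rwa [List.drop_drop, prefix_single_drop] at hj⟩
  · rintro ⟨j, hj⟩
    exact ⟨j, by rw [List.drop_drop, prefix_single_drop]; exact hj⟩

theorem findFrom_spec (cs : List Char) (c : Char) (k : Nat) :
    PySem.Chars.findFrom cs [c] (k : Int) none =
      (match scanCh c cs k with | some j => (j : Int) | none => -1) := by
  by_cases hk : k ≤ cs.length
  · rw [PySem.Chars.findFrom_natCast cs [c] k hk]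
    cases hs : scanCh c cs k with
    | none =>
      have hno : PySem.Chars.find (cs.drop k) [c] = -1 := by
        rw [PySem.Chars.find_eq_neg_one_iff, infix_single_drop]
        rintro ⟨j, hj⟩
        exact scanCh_none c cs k hs (k + j) (by omega)
          (by by_contra hcon; rw [List.getElem?_eq_none (by omega)] at hj; simp at hj) hj
      simp [hno]
    | some j =>
      obtain ⟨h1, h2, h3, h4⟩ := scanCh_some c cs k j hs
      have hocc : [c] <+: (cs.drop k).drop (j - k) := by
        rw [List.drop_drop, prefix_single_drop, show k + (j - k) = j by omega]; exact h3
      have hne : PySem.Chars.find (cs.drop k) [c] ≠ -1 := by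
        rw [PySem.Chars.find_ne_neg_one_iff, infix_single_drop]
        exact ⟨j - k, by rw [show k + (j - k) = j by omega]; exact h3⟩
      have hge : (0 : Int) ≤ PySem.Chars.find (cs.drop k) [c] := by
        have := PySem.Chars.neg_one_le_find (cs.drop k) [c]; omega
      obtain ⟨hpre, hmin⟩ := PySem.Chars.find_spec hge
      have hle : (PySem.Chars.find (cs.drop k) [c]).toNat ≤ j - k := by
        by_contra hcon
        exact hmin (j - k) (by omega) hocc
      have hocc2 : cs[k + (PySem.Chars.find (cs.drop k) [c]).toNat]? = some c := by
        rw [List.drop_drop, prefix_single_drop] at hpre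
        exact hpre
      have hgej : j ≤ k + (PySem.Chars.find (cs.drop k) [c]).toNat := by
        by_contra hcon
        exact h4 (k + (PySem.Chars.find (cs.drop k) [c]).toNat) (by omega) (by omega) hocc2
      rw [if_neg hne]
      show (k : Int) + PySem.Chars.find (cs.drop k) [c] = (j : Int)
      omega
  · have hgt : cs.length < k := by omega
    rw [scanCh_ge_len c cs k (by omega)]
    simp only [PySem.Chars.findFrom]
    have h1 : ¬ ((k : Int) < 0) := by omega
    simp only [if_neg h1]
    rw [if_pos (by omega)]

theorem loopA_run (cs : List Char) (d : Nat) : ∀ i acc, i + d ≤ cs.length →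
    (∀ kk, i ≤ kk → kk < i + d → cs[kk]? ≠ some '(') →
    loopA cs i acc = loopA cs (i + d) (acc ++ (cs.drop i).take d) := by
  induction d with
  | zero => intro i acc _ _; simp
  | succ d ihd =>
    intro i acc hle hno
    have hi : i < cs.length := by omega
    have hc : cs[i] ≠ '(' := by
      intro hcon
      exact hno i le_rfl (by omega) (by rw [List.getElem?_eq_getElem hi, hcon])
    rw [loopA]
    simp only [hi, dif_pos, ne_eq, hc, not_false_eq_true, if_true]
    rw [ihd (i + 1) (acc ++ [cs[i]]) (by omega) (fun kk h1 h2 => hno kk (by omega) (by omega))]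
    rw [List.drop_eq_getElem_cons hi, List.take_succ_cons]
    rw [show i + 1 + d = i + (d + 1) by omega]
    simp

theorem okFrom_run (cs : List Char) (d : Nat) : ∀ i, i + d ≤ cs.length →
    (∀ kk, i ≤ kk → kk < i + d → cs[kk]? ≠ some '(') →
    okFrom cs i = true → okFrom cs (i + d) = true := by
  induction d with
  | zero => intro i _ _ h; exact h
  | succ d ihd =>
    intro i hle hno hok
    have hi : i < cs.length := by omega
    have hc : cs[i] ≠ '(' := by
      intro hcon
      exact hno i le_rfl (by omega) (by rw [List.getElem?_eq_getElem hi, hcon])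
    rw [okFrom] at hok
    simp only [hi, dif_pos, ne_eq, hc, not_false_eq_true, if_true] at hok
    rw [show i + (d + 1) = i + 1 + d by omega]
    exact ihd (i + 1) (by omega) (fun kk h1 h2 => hno kk (by omega) (by omega)) hok

theorem slice_nat_add_one (cs : List Char) (m j : Nat) :
    PySem.List.slice cs (some ((m : Int) + 1)) (some (j : Int)) =
      (cs.drop (m + 1)).take (j - (m + 1)) := by
  rw [show ((m : Int) + 1) = ((m + 1 : Nat) : Int) by push_cast; ring, PySem.List.slice_natCast]

theorem findIdx?_drop_scan (c : Char) (cs : List Char) (k : Nat) :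
    (cs.drop k).findIdx? (fun x => x = c) = (scanCh c cs k).map (fun j => j - k) := by
  induction hd : cs.length - k generalizing k with
  | zero =>
    rw [List.drop_eq_nil_of_le (by omega), scanCh_ge_len c cs k (by omega)]
    simp
  | succ d ihd =>
    have hk : k < cs.length := by omega
    rw [List.drop_eq_getElem_cons hk, List.findIdx?_cons]
    rw [scanCh]
    simp only [hk, dif_pos]
    by_cases hc : cs[k] = c
    · simp [hc]
    · rw [if_neg (by simp [hc]), if_neg hc]
      rw [ihd (k + 1) (by omega)]
      cases hs : scanCh c cs (k + 1) with
      | none => simp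
      | some j =>
        obtain ⟨h1, _, _, _⟩ := scanCh_some c cs (k + 1) j hs
        simp only [Option.map_some]
        congr 1
        omega

theorem wf_imp_ok (cs : List Char) : ∀ fuel i, cs.length - i ≤ fuel →
    wfTail fuel (cs.drop i) = true → okFrom cs i = true := by
  intro fuel
  induction fuel with
  | zero =>
    intro i hb _
    rw [okFrom, dif_neg (by omega)]
  | succ fuel ih =>
    intro i hb hwf
    by_cases hi : i < cs.length
    · rw [List.drop_eq_getElem_cons hi, wfTail] at hwf
      by_cases hc : cs[i] = '('
      · rw [if_neg (by simp [hc])] at hwf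
        rw [findIdx?_drop_scan ')' cs (i + 1)] at hwf
        cases hcl : scanCh ')' cs (i + 1) with
        | none => rw [hcl] at hwf; simp at hwf
        | some j =>
          obtain ⟨hj1, hj2, _, _⟩ := scanCh_some ')' cs (i + 1) j hcl
          rw [hcl] at hwf
          simp only [Option.map_some] at hwf
          have htake : (cs.drop (i + 1)).take (j - (i + 1)) =
              PySem.List.slice cs (some ((i : Int) + 1)) (some (j : Int)) :=
            (slice_nat_add_one cs i j).symm
          rw [htake] at hwf
          cases hpm : parseMarker (PySem.List.slice cs (some ((i : Int) + 1)) (some (j : Int))) with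
          | none => rw [hpm] at hwf; simp at hwf
          | some pr =>
            obtain ⟨off, rep⟩ := pr
            rw [hpm] at hwf
            simp only [Bool.and_eq_true, decide_eq_true_eq] at hwf
            obtain ⟨hoff, hwf⟩ := hwf
            rw [List.drop_drop, List.drop_drop] at hwf
            rw [show i + 1 + (j - (i + 1) + 1 + off.toNat) = j + 1 + off.toNat by omega] at hwf
            rw [okFrom]
            simp only [hi, dif_pos, ne_eq, hc, not_true_eq_false, if_false]
            rw [hcl]
            simp only []
            rw [hpm]
            simp only []
            rw [dif_pos ⟨hoff, by omega⟩]
            exact ih (j + 1 + off.toNat) (by omega) hwf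
      · rw [if_pos (by simp [hc])] at hwf
        rw [okFrom]
        simp only [hi, dif_pos, ne_eq, hc, not_false_eq_true, if_true]
        exact ih (i + 1) (by omega) hwf
    · rw [okFrom, dif_neg (by omega)]


theorem pv_loop_eq_ge (cs : List Char) (i : Nat) (acc : List Char) (hi : cs.length ≤ i) :
    loopA cs i acc = loopB cs i acc := by
  rw [loopA, loopB]
  have h1 : scanCh '(' cs i = none := scanCh_ge_len _ _ _ hi
  have h2 : ¬ i < cs.length := by omega
  simp [findFrom_spec, h1, h2, PySem.List.slice_from_natCast, List.drop_eq_nil_of_le hi]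

theorem pv_loop_eq (cs : List Char) (n : Nat) : ∀ i acc, cs.length - i ≤ n → okFrom cs i = true →
    loopA cs i acc = loopB cs i acc := by
  induction n with
  | zero => intro i acc hb _; exact pv_loop_eq_ge cs i acc (by omega)
  | succ n ih =>
    intro i acc hb hok
    by_cases hi : i < cs.length
    · cases hscan : scanCh '(' cs i with
      | none =>
        have hno : ∀ kk, i ≤ kk → kk < i + (cs.length - i) → cs[kk]? ≠ some '(' :=
          fun kk h1 h2 => scanCh_none '(' cs i hscan kk h1 (by omega)
        rw [loopA_run cs (cs.length - i) i acc (by omega) hno]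
        rw [show i + (cs.length - i) = cs.length by omega]
        rw [loopA, dif_neg (by omega), loopB]
        simp only [findFrom_spec, hscan]
        rw [if_pos trivial, PySem.List.slice_from_natCast]
        rw [List.take_of_length_le (by simp)]
      | some m =>
        obtain ⟨him, hmlen, hm3, hmmin⟩ := scanCh_some '(' cs i m hscan
        have hm' : cs[m] = '(' := by
          rw [List.getElem?_eq_getElem hmlen] at hm3; injection hm3
        -- A runs through the plain characters up to m
        have hnom : ∀ kk, i ≤ kk → kk < i + (m - i) → cs[kk]? ≠ some '(' :=
          fun kk h1 h2 => hmmin kk h1 (by omega)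
        rw [loopA_run cs (m - i) i acc (by omega) hnom]
        rw [show i + (m - i) = m by omega]
        have hokm : okFrom cs m = true := by
          have := okFrom_run cs (m - i) i (by omega) hnom hok
          rwa [show i + (m - i) = m by omega] at this
        -- unfold okFrom at m: the marker there is well formed
        rw [okFrom] at hokm
        simp only [hmlen, dif_pos, ne_eq, hm', not_true_eq_false, if_false, ite_false] at hokm
        cases hcl : scanCh ')' cs (m + 1) with
        | none => rw [hcl] at hokm; simp at hokm
        | some j =>
          rw [hcl] at hokm
          simp only [] at hokm
          cases hpm : parseMarker (PySem.List.slice cs (some ((m : Int) + 1)) (some (j : Int))) with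
          | none => rw [hpm] at hokm; simp at hokm
          | some pr =>
            obtain ⟨off, rep⟩ := pr
            rw [hpm] at hokm
            simp only [] at hokm
            obtain ⟨hmj, hjlen, hj3, hjmin⟩ := scanCh_some ')' cs (m + 1) j hcl
            have hoff : 0 ≤ off ∧ m < j + 1 + off.toNat := by
              by_contra hcon
              rw [dif_neg hcon] at hokm; simp at hokm
            rw [dif_pos hoff] at hokm
            -- reduce A's step at the marker
            rw [loopA]
            simp only [hmlen, dif_pos, ne_eq, hm', not_true_eq_false, if_false, ite_false]
            rw [hcl]
            simp only []
            rw [hpm]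
            simp only []
            have hL : (((PySem.List.slice cs (some ((m : Int) + 1)) (some (j : Int))).length : Nat) : Int)
                = (j : Int) - m - 1 := by
              rw [slice_nat_add_one]
              simp only [List.length_take, List.length_drop]
              omega
            rw [hL]
            rw [dif_pos (by omega)]
            rw [show ((m : Int) + 2 + ((j : Int) - ↑m - 1) + off).toNat = j + 1 + off.toNat by omega]
            -- reduce B's step: it finds the same marker and the same closing paren
            rw [loopB]
            simp only [findFrom_spec, hscan]
            rw [if_neg (by omega)]
            rw [scanCh_step ')' cs m hmlen (by simp [hm']), hcl]
            simp only []
            rw [if_neg (by omega)]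
            rw [hpm]
            simp only []
            rw [dif_pos (by constructor <;> omega)]
            rw [show ((j : Int) + 1 + off).toNat = j + 1 + off.toNat by omega]
            rw [PySem.List.slice_natCast]
            exact ih (j + 1 + off.toNat)
              ((acc ++ (cs.drop i).take (m - i)) ++
                PySem.List.pyRepeat (PySem.List.slice cs (some ((j : Int) + 1)) (some ((j : Int) + 1 + off))) rep)
              (by omega) hokm
    · exact pv_loop_eq_ge cs i acc (by omega)

-- ===== VERDICT (by name: the statement is the Claim_ definition above) =====
theorem one_swipe_py_spec : Claim_equal_one_swipe_py := by
  intro s _ hpre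
  unfold Spec_one_swipe_py one_swipe_py one_swipe_py_alt
  have hok : okFrom (pvStrip s.toList) 0 = true :=
    wf_imp_ok (pvStrip s.toList) (pvStrip s.toList).length 0 (by omega) (by simpa using hpre)
  exact congrArg String.ofList (pv_loop_eq (pvStrip s.toList) (pvStrip s.toList).length 0 [] (by omega) hok)
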